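-- pv_equiv track=rewrite | github.com/tejasvaidhyadev/mila_course | nlp/a2_code/code.py | skipgram_preprocessing
-- ===== SOURCE A (Python) =====
-- def build_current_surrounding_pairs(sample_indices, window_size):
--     # YOUR CODE HERE
--     current_indices = []
--     surrounding_indices = []
--     for i in range(len(sample_indices)):
--         if i < window_size or i >= len(sample_indices) - window_size:
--             continue
--         current_indices.append(sample_indices[i])
--         surrounding_indices.append(sample_indices[i - window_size:i] + sample_indices[i + 1:i + window_size + 1])
--     return surrounding_indices, current_indices
--
-- def expand_surrounding_words(ix_surroundings: "list[list[int]]", ix_current: "list[int]"):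
--     ix_surroundings_expanded = []
--     ix_current_expanded = []
--     for i in range(len(ix_surroundings)):
--         for j in range(len(ix_surroundings[i])):
--             ix_surroundings_expanded.append(ix_surroundings[i][j])
--             ix_current_expanded.append(ix_current[i])
--     return ix_surroundings_expanded, ix_current_expanded
--
-- def skipgram_preprocessing(indices_list: "list[list[int]]", window_size: int = 2):
--     # TODO: your work here
--     ix_surroundings = []
--     ix_current = []
--     for indices in indices_list:
--         surrounding_pairs, current_word = build_current_surrounding_pairs(indices, window_size)
--         ix_surroundings.extend(surrounding_pairs)
--         ix_current.extend(current_word)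
--     ix_surroundings_expanded, ix_current_expanded = expand_surrounding_words(ix_surroundings, ix_current)
--
--     return ix_surroundings_expanded, ix_current_expanded
-- ===== SOURCE B (Python) =====
-- def skipgram_preprocessing(indices_list: "list[list[int]]", window_size: int = 2):
--     w = 2 * window_size + 1
--     surroundings, currents = [], []
--     for sub in indices_list:
--         for k in range(len(sub)):
--             win = sub[k:k + w]
--             if len(win) != w:
--                 continue
--             ctx = win[:window_size] + win[window_size + 1:]
--             surroundings += ctx
--             currents += [win[window_size]] * len(ctx)
--     return surroundings, currents
-- ===== Notes on version B (the rewrite author's own statement) =====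
-- stated objective: alternative
-- what changed: Replaced A's three-phase pipeline (per-sentence boundary-guarded pair builder with index arithmetic, cross-sentence accumulation of a nested surroundings list, then a separate index-driven expansion pass) with a sliding fixed-size window: slide a window of length 2*window_size+1 over each sentence, keep only full windows, take the context as the window minus its middle element, and emit it with the replicated center in one pass.
-- intended difference: For window_size <= -2 with some sublist longer than -window_size, the negative slice stop in A's sub[i+1:i+window_size+1] wraps around and A returns spurious nonempty surrounding/center pairs, while B returns two empty lists, the intended empty skipgram set for a non-positive window. — e.g. on skipgram_preprocessing([[1, 2, 3]], -2): A returns ([2], [1]), B returns ([], [])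
import Mathlib
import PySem

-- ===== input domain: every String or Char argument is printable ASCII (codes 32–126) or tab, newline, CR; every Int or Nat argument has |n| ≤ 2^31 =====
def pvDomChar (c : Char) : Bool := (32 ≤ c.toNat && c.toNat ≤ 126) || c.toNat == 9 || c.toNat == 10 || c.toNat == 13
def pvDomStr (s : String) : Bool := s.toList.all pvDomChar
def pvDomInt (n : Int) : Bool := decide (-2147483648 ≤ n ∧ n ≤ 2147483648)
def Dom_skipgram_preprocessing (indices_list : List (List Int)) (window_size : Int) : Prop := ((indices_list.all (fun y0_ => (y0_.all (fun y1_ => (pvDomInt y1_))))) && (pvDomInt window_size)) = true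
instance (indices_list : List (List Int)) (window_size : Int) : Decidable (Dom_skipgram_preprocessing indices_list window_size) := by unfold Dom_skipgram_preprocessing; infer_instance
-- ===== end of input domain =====

-- B replaces A's build-nested-pairs-then-expand pipeline by sliding a fixed-size window over
-- each sentence (objective: alternative, same cost); on window_size ≤ -2 A's negative slice
-- stop wraps around and A emits spurious pairs where B emits none (see D_ below).

-- ===== PORT A =====

-- helper build_current_surrounding_pairs: returns (surrounding_indices, current_indices)
def pvBuildPairs (sample_indices : List Int) (window_size : Int) : List (List Int) × List Int :=
  (List.range sample_indices.length).foldl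
    (fun acc (i : ℕ) =>
      if (i : Int) < window_size ∨ (i : Int) ≥ (sample_indices.length : Int) - window_size then
        acc
      else
        (acc.1 ++ [PySem.List.slice sample_indices (some ((i : Int) - window_size)) (some (i : Int)) ++
                   PySem.List.slice sample_indices (some ((i : Int) + 1)) (some ((i : Int) + window_size + 1))],
         acc.2 ++ [sample_indices.getD i 0]))
    ([], [])

-- helper expand_surrounding_words
def pvExpand (ix_surroundings : List (List Int)) (ix_current : List Int) : List Int × List Int :=
  (List.range ix_surroundings.length).foldl
    (fun acc i =>
      (List.range (ix_surroundings.getD i []).length).foldl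
        (fun acc2 j =>
          (acc2.1 ++ [(ix_surroundings.getD i []).getD j 0], acc2.2 ++ [ix_current.getD i 0]))
        acc)
    ([], [])

def skipgram_preprocessing (indices_list : List (List Int)) (window_size : Int) : List Int × List Int :=
  let st := indices_list.foldl
    (fun acc indices =>
      let bp := pvBuildPairs indices window_size
      (acc.1 ++ bp.1, acc.2 ++ bp.2))
    ([], [])
  pvExpand st.1 st.2

-- ===== PORT B =====
def skipgram_preprocessing_alt (indices_list : List (List Int)) (window_size : Int) : List Int × List Int :=
  let w : Int := 2 * window_size + 1
  indices_list.foldl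
    (fun acc sub =>
      (List.range sub.length).foldl
        (fun acc2 (k : ℕ) =>
          let win := PySem.List.slice sub (some (k : Int)) (some ((k : Int) + w))
          if (win.length : Int) ≠ w then acc2
          else
            let ctx := PySem.List.slice win none (some window_size) ++
                       PySem.List.slice win (some (window_size + 1)) none
            (acc2.1 ++ ctx,
             acc2.2 ++ List.replicate ctx.length ((PySem.List.pyGet? win window_size).getD 0)))
        acc)
    ([], [])

-- ===== PRECONDITION & SPEC =====
-- For window_size ≤ -2 with some sublist longer than -window_size, the negative slice stop in
-- A's sub[i+1:i+window_size+1] wraps around and A returns spurious nonempty surrounding/center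
-- pairs, while B returns two empty lists, the intended empty skipgram set for a non-positive
-- window.
def D_skipgram_preprocessing (indices_list : List (List Int)) (window_size : Int) : Prop :=
  window_size ≤ -2 ∧ ∃ sub ∈ indices_list, -window_size < (sub.length : Int)
instance (indices_list : List (List Int)) (window_size : Int) : Decidable (D_skipgram_preprocessing indices_list window_size) := by unfold D_skipgram_preprocessing; infer_instance

def Spec_skipgram_preprocessing (indices_list : List (List Int)) (window_size : Int) (out : List Int × List Int) : Prop := ¬ D_skipgram_preprocessing indices_list window_size → out = skipgram_preprocessing_alt indices_list window_size
instance (indices_list : List (List Int)) (window_size : Int) (out : List Int × List Int) : Decidable (Spec_skipgram_preprocessing indices_list window_size out) := by unfold Spec_skipgram_preprocessing; infer_instance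

def pvDiffWitness_skipgram_preprocessing : List (List Int) × Int := ([[1, 2, 3]], -2)
def pvDiffWitnessOut_skipgram_preprocessing : (List Int × List Int) × (List Int × List Int) :=
  (([2], [1]), ([], []))

-- ===== CLAIM (what is proved, stated in full; the proofs are below) =====
def Claim_unchanged_skipgram_preprocessing : Prop := ∀ (indices_list : List (List Int)) (window_size : Int), Dom_skipgram_preprocessing indices_list window_size → Spec_skipgram_preprocessing indices_list window_size (skipgram_preprocessing indices_list window_size)
def Claim_changed_skipgram_preprocessing : Prop := Dom_skipgram_preprocessing (pvDiffWitness_skipgram_preprocessing.1) (pvDiffWitness_skipgram_preprocessing.2) ∧ D_skipgram_preprocessing (pvDiffWitness_skipgram_preprocessing.1) (pvDiffWitness_skipgram_preprocessing.2) ∧ skipgram_preprocessing (pvDiffWitness_skipgram_preprocessing.1) (pvDiffWitness_skipgram_preprocessing.2) = pvDiffWitnessOut_skipgram_preprocessing.1 ∧ skipgram_preprocessing_alt (pvDiffWitness_skipgram_preprocessing.1) (pvDiffWitness_skipgram_preprocessing.2) = pvDiffWitnessOut_skipgram_preprocessing.2 ∧ pvDiffWitnessOut_skipgram_preprocessing.1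 ≠ pvDiffWitnessOut_skipgram_preprocessing.2
def Claim_exact_skipgram_preprocessing : Prop := ∀ (indices_list : List (List Int)) (window_size : Int), Dom_skipgram_preprocessing indices_list window_size → D_skipgram_preprocessing indices_list window_size → skipgram_preprocessing indices_list window_size ≠ skipgram_preprocessing_alt indices_list window_size

-- ===== LEMMAS AND PROOFS =====

-- the surrounding slice A builds at center i
def pvS (sub : List Int) (ws : Int) (i : ℕ) : List Int :=
  PySem.List.slice sub (some ((i : Int) - ws)) (some (i : Int)) ++
  PySem.List.slice sub (some ((i : Int) + 1)) (some ((i : Int) + ws + 1))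

-- the window B slides to position k, and the context/center it reads off it
def pvWin (sub : List Int) (ws : Int) (k : ℕ) : List Int :=
  PySem.List.slice sub (some (k : Int)) (some ((k : Int) + (2 * ws + 1)))
def pvCtx (sub : List Int) (ws : Int) (k : ℕ) : List Int :=
  PySem.List.slice (pvWin sub ws k) none (some ws) ++
  PySem.List.slice (pvWin sub ws k) (some (ws + 1)) none
def pvCen (sub : List Int) (ws : Int) (k : ℕ) : Int :=
  (PySem.List.pyGet? (pvWin sub ws k) ws).getD 0

-- A's build loop: appends under a skip-condition, collected as two filterMaps
theorem pv_foldl_if_snoc {α β : Type} (n : ℕ) (c : ℕ → Prop) [DecidablePred c]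
    (f : ℕ → α) (g : ℕ → β) :
    ∀ (a : List α) (b : List β),
      (List.range n).foldl
        (fun acc i => if c i then acc else (acc.1 ++ [f i], acc.2 ++ [g i])) (a, b)
      = (a ++ (List.range n).filterMap (fun i => if c i then none else some (f i)),
         b ++ (List.range n).filterMap (fun i => if c i then none else some (g i))) := by
  induction n with
  | zero => simp
  | succ m ih =>
    intro a b
    simp only [List.range_succ, List.foldl_append, List.filterMap_append, ih]
    by_cases h : c m <;> simp [h]

-- expand's inner loop over indices of a fixed list
theorem pv_foldl_range_getD (xs : List Int) (cv : Int) :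
    ∀ n ≤ xs.length, ∀ (acc : List Int × List Int),
      (List.range n).foldl (fun a j => (a.1 ++ [xs.getD j 0], a.2 ++ [cv])) acc
      = (acc.1 ++ xs.take n, acc.2 ++ (xs.take n).map fun _ => cv) := by
  intro n
  induction n with
  | zero => simp
  | succ m ih =>
    intro hm acc
    have hmlt : m < xs.length := by omega
    simp only [List.range_succ, List.foldl_append, ih (by omega)]
    rw [List.foldl_cons, List.foldl_nil, List.getD_eq_getElem xs 0 hmlt,
        List.take_succ_eq_append_getElem hmlt]
    simp
    rw [Nat.min_eq_left (Nat.le_of_lt hmlt), Nat.min_eq_left hm, List.replicate_succ']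

-- expand over zipped pairs p: it flattens the surroundings and repeats each center
theorem pv_expand_eq (p : List (List Int × Int)) :
    ∀ n ≤ p.length, ∀ (acc : List Int × List Int),
      (List.range n).foldl
        (fun a i =>
          (List.range ((p.map Prod.fst).getD i []).length).foldl
            (fun a2 j =>
              (a2.1 ++ [((p.map Prod.fst).getD i []).getD j 0],
               a2.2 ++ [(p.map Prod.snd).getD i 0])) a)
        acc
      = (acc.1 ++ (p.take n).flatMap (fun q => q.1),
         acc.2 ++ (p.take n).flatMap fun q => q.1.map fun _ => q.2) := by
  intro n
  induction n with
  | zero => simp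
  | succ m ih =>
    intro hm acc
    have hmlt : m < p.length := by omega
    simp only [List.range_succ, List.foldl_append, ih (by omega)]
    have h1 : (p.map Prod.fst).getD m [] = (p[m]).1 := by
      simp [List.getD, List.getElem?_eq_getElem hmlt]
    have h2 : (p.map Prod.snd).getD m 0 = (p[m]).2 := by
      simp [List.getD, List.getElem?_eq_getElem hmlt]
    simp only [List.foldl_cons, List.foldl_nil, h1, h2,
      pv_foldl_range_getD (p[m]).1 (p[m]).2 (p[m]).1.length (le_refl _)]
    rw [List.take_succ_eq_append_getElem hmlt, List.flatMap_append, List.flatMap_append]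
    simp

-- B's window loop: skip-condition plus bulk emission, collected as two flatMaps
theorem pv_foldl_if_app (n : ℕ) (c : ℕ → Prop) [DecidablePred c]
    (F G : ℕ → List Int) :
    ∀ (acc : List Int × List Int),
      (List.range n).foldl
        (fun a k => if c k then a else (a.1 ++ F k, a.2 ++ G k))
        acc
      = (acc.1 ++ (List.range n).flatMap (fun k => if c k then [] else F k),
         acc.2 ++ (List.range n).flatMap fun (k : ℕ) => if c k then [] else G k) := by
  induction n with
  | zero => simp
  | succ m ih =>
    intro acc
    simp only [List.range_succ, List.foldl_append, List.flatMap_append, ih]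
    by_cases h : c m <;> simp [h]

-- common outer accumulation shape
theorem pv_foldl_pair_append {σ α β : Type} (l : List σ) (F : σ → List α) (G : σ → List β) :
    ∀ (acc : List α × List β),
      l.foldl (fun a s => (a.1 ++ F s, a.2 ++ G s)) acc
      = (acc.1 ++ l.flatMap F, acc.2 ++ l.flatMap G) := by
  induction l with
  | nil => simp
  | cons x xs ih => intro acc; simp [ih]

-- flatMap of a guarded filterMap
theorem pv_flatMap_filterMap {ι α β : Type} (l : List ι) (c : ι → Prop) [DecidablePred c]
    (f : ι → α) (h : α → List β) :
    (l.filterMap fun i => if c i then none else some (f i)).flatMap h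
    = l.flatMap fun i => if c i then [] else h (f i) := by
  induction l with
  | nil => simp
  | cons x xs ih => by_cases hx : c x <;> simp [hx, ih]

-- A in canonical form: one guarded flatMap per sentence
theorem pv_A_eq (l : List (List Int)) (ws : Int) :
    skipgram_preprocessing l ws =
      (l.flatMap fun sub => (List.range sub.length).flatMap fun (i : ℕ) =>
         if (i : Int) < ws ∨ (i : Int) ≥ (sub.length : Int) - ws then [] else pvS sub ws i,
       l.flatMap fun sub => (List.range sub.length).flatMap fun (i : ℕ) =>
         if (i : Int) < ws ∨ (i : Int) ≥ (sub.length : Int) - ws then []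
         else (pvS sub ws i).map fun _ => sub.getD i 0) := by
  set C : List Int → ℕ → Prop :=
    fun sub i => (i : Int) < ws ∨ (i : Int) ≥ (sub.length : Int) - ws with hC
  set P : List (List Int × Int) :=
    l.flatMap fun sub =>
      (List.range sub.length).filterMap fun i =>
        if C sub i then none else some (pvS sub ws i, sub.getD i 0) with hP
  have hA1 : (l.foldl
        (fun acc indices =>
          let bp := pvBuildPairs indices ws
          (acc.1 ++ bp.1, acc.2 ++ bp.2))
        ([], []))
      = (P.map Prod.fst, P.map Prod.snd) := by
    have hbp : ∀ sub : List Int, pvBuildPairs sub ws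
        = ((List.range sub.length).filterMap fun i =>
             if C sub i then none else some (pvS sub ws i),
           (List.range sub.length).filterMap fun i =>
             if C sub i then none else some (sub.getD i 0)) := by
      intro sub
      unfold pvBuildPairs
      exact pv_foldl_if_snoc sub.length (C sub) (pvS sub ws) (fun i => sub.getD i 0) [] []
    have : (fun (acc : List (List Int) × List Int) (indices : List Int) =>
        let bp := pvBuildPairs indices ws
        (acc.1 ++ bp.1, acc.2 ++ bp.2))
        = fun acc indices =>
            (acc.1 ++ ((List.range indices.length).filterMap fun i =>
               if C indices i then none else some (pvS indices ws i)),
             acc.2 ++ ((List.range indices.length).filterMap fun i =>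
               if C indices i then none else some (indices.getD i 0))) := by
      funext acc indices
      simp [hbp indices]
    rw [this, pv_foldl_pair_append]
    simp only [Prod.mk.injEq]
    constructor <;>
      simp [hP, List.map_flatMap, List.map_filterMap, apply_ite (Option.map _)]
  unfold skipgram_preprocessing
  simp only [hA1]
  have hexp : pvExpand (P.map Prod.fst) (P.map Prod.snd)
      = (P.flatMap (fun q => q.1), P.flatMap fun q => q.1.map fun _ => q.2) := by
    unfold pvExpand
    have hlen : (P.map Prod.fst).length = P.length := by simp
    rw [hlen]
    simpa using pv_expand_eq P P.length (le_refl _) ([], [])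
  rw [hexp, hP]
  simp only [Prod.mk.injEq]
  constructor <;>
    · rw [List.flatMap_assoc]
      refine congrArg (l.flatMap ·) (funext fun sub => ?_)
      rw [pv_flatMap_filterMap]

-- B in canonical form: one guarded flatMap per sentence
theorem pv_B_eq (l : List (List Int)) (ws : Int) :
    skipgram_preprocessing_alt l ws =
      (l.flatMap fun sub => (List.range sub.length).flatMap fun (k : ℕ) =>
         if ((pvWin sub ws k).length : Int) ≠ 2 * ws + 1 then [] else pvCtx sub ws k,
       l.flatMap fun sub => (List.range sub.length).flatMap fun (k : ℕ) =>
         if ((pvWin sub ws k).length : Int) ≠ 2 * ws + 1 then []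
         else List.replicate (pvCtx sub ws k).length (pvCen sub ws k)) := by
  have hfun : (fun (acc : List Int × List Int) (sub : List Int) =>
      (List.range sub.length).foldl
        (fun acc2 (k : ℕ) =>
          let win := PySem.List.slice sub (some (k : Int)) (some ((k : Int) + (2 * ws + 1)))
          if (win.length : Int) ≠ 2 * ws + 1 then acc2
          else
            let ctx := PySem.List.slice win none (some ws) ++
                       PySem.List.slice win (some (ws + 1)) none
            (acc2.1 ++ ctx,
             acc2.2 ++ List.replicate ctx.length ((PySem.List.pyGet? win ws).getD 0)))
        acc)
      = fun acc sub =>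
          (acc.1 ++ (List.range sub.length).flatMap
              (fun k => if ((pvWin sub ws k).length : Int) ≠ 2 * ws + 1 then [] else pvCtx sub ws k),
           acc.2 ++ (List.range sub.length).flatMap
              fun k => if ((pvWin sub ws k).length : Int) ≠ 2 * ws + 1 then []
                       else List.replicate (pvCtx sub ws k).length (pvCen sub ws k)) := by
    funext acc sub
    exact pv_foldl_if_app sub.length
      (fun k => ((pvWin sub ws k).length : Int) ≠ 2 * ws + 1)
      (fun k => pvCtx sub ws k)
      (fun k => List.replicate (pvCtx sub ws k).length (pvCen sub ws k)) acc
  show (List.foldl (fun (acc : List Int × List Int) (sub : List Int) =>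
      (List.range sub.length).foldl
        (fun acc2 (k : ℕ) =>
          let win := PySem.List.slice sub (some (k : Int)) (some ((k : Int) + (2 * ws + 1)))
          if (win.length : Int) ≠ 2 * ws + 1 then acc2
          else
            let ctx := PySem.List.slice win none (some ws) ++
                       PySem.List.slice win (some (ws + 1)) none
            (acc2.1 ++ ctx,
             acc2.2 ++ List.replicate ctx.length ((PySem.List.pyGet? win ws).getD 0)))
        acc) ([], []) l) = _
  rw [hfun, pv_foldl_pair_append]
  simp

-- guarded flatMap over an initial segment
theorem pv_cut {α : Type} (t : ℕ) (H : ℕ → List α) :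
    ∀ n, (List.range n).flatMap (fun k => if k < t then H k else [])
      = (List.range (min t n)).flatMap H := by
  intro n
  induction n with
  | zero => simp
  | succ m ih =>
    by_cases h : m < t
    · have h1 : min t (m + 1) = min t m + 1 := by omega
      have h2 : min t m = m := by omega
      rw [List.range_succ, List.flatMap_append, ih, h1, List.range_succ, List.flatMap_append, h2]
      simp [h]
    · have h1 : min t (m + 1) = min t m := by omega
      rw [List.range_succ, List.flatMap_append, ih, h1]
      simp [h]

-- guarded flatMap over a band [s, t), re-indexed from 0
theorem pv_band {α : Type} (s t : ℕ) (F : ℕ → List α) :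
    ∀ n, (List.range n).flatMap (fun i => if s ≤ i ∧ i < t then F i else [])
      = (List.range (min t n - s)).flatMap fun k => F (k + s) := by
  intro n
  induction n with
  | zero => simp
  | succ m ih =>
    by_cases h : s ≤ m ∧ m < t
    · have h1 : min t (m + 1) - s = (min t m - s) + 1 := by omega
      have h2 : (min t m - s) + s = m := by omega
      rw [List.range_succ, List.flatMap_append, ih, h1, List.range_succ, List.flatMap_append]
      simp [h, h2]
    · have h1 : min t (m + 1) - s = min t m - s := by omega
      rw [List.range_succ, List.flatMap_append, ih, h1]
      simp [h]

-- a slice with non-negative, non-increasing bounds is empty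
theorem pv_slice_nil (sub : List Int) (a b : Int) (ha : 0 ≤ b) (hb : b ≤ a) :
    PySem.List.slice sub (some a) (some b) = [] := by
  have hle : PySem.List.clampIdx sub.length b ≤ PySem.List.clampIdx sub.length a := by
    simp only [PySem.List.clampIdx]
    split_ifs <;> omega
  simp [PySem.List.slice, Nat.sub_eq_zero_of_le hle]

-- A's per-center emission is empty for every negative ws outside the wraparound region
theorem pv_S_nil (sub : List Int) (ws : Int) (i : ℕ) (hws : ws < 0)
    (h : 0 ≤ (i : Int) + ws + 1 ∨ (sub.length : Int) ≤ -ws) : pvS sub ws i = [] := by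
  unfold pvS
  rw [pv_slice_nil sub ((i : Int) - ws) (i : Int) (by omega) (by omega)]
  by_cases hpos : 0 ≤ (i : Int) + ws + 1
  · rw [pv_slice_nil sub ((i : Int) + 1) ((i : Int) + ws + 1) hpos (by omega)]
    rfl
  · have hn : (sub.length : Int) ≤ -ws := by tauto
    have hlen : (PySem.List.slice sub (some ((i : Int) + 1)) (some ((i : Int) + ws + 1))).length = 0 := by
      rw [PySem.List.length_slice]
      have hle : PySem.List.clampIdx sub.length ((i : Int) + ws + 1)
          ≤ PySem.List.clampIdx sub.length ((i : Int) + 1) := by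
        simp only [PySem.List.clampIdx]
        split_ifs <;> omega
      omega
    rw [List.eq_nil_of_length_eq_zero hlen]
    rfl

-- B's window guard always fails for a negative window width
theorem pv_win_guard_neg (sub : List Int) (ws : Int) (k : ℕ) (hws : ws < 0) :
    ((pvWin sub ws k).length : Int) ≠ 2 * ws + 1 := by
  have h0 : (0 : Int) ≤ ((pvWin sub ws k).length : Int) := by positivity
  omega

-- for ws = m ≥ 0 a full window is a take of a drop
theorem pv_win_full (sub : List Int) (m k : ℕ) :
    pvWin sub (m : Int) k = List.take (2 * m + 1) (List.drop k sub) := by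
  unfold pvWin
  have hc : (k : Int) + (2 * (m : Int) + 1) = (k : Int) + ((2 * m + 1 : ℕ) : Int) := by push_cast; ring
  rw [hc, PySem.List.slice_natCast_add]

-- the window guard holds exactly when the window is not full
theorem pv_guard_iff (sub : List Int) (m k : ℕ) :
    (((pvWin sub (m : Int) k).length : Int) ≠ 2 * (m : Int) + 1)
      ↔ ¬ (k + (2 * m + 1) ≤ sub.length) := by
  rw [pv_win_full, List.length_take, List.length_drop]
  constructor
  · intro h hk
    exact h (by push_cast; omega)
  · intro h hc
    have : min (2 * m + 1) (sub.length - k) = 2 * m + 1 := by exact_mod_cast hc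
    omega

-- in a full window, B's context coincides with A's surrounding slice at center k + m
theorem pv_ctx_eq (sub : List Int) (m k : ℕ) (_h : k + (2 * m + 1) ≤ sub.length) :
    pvCtx sub (m : Int) k = pvS sub (m : Int) (k + m) := by
  unfold pvCtx pvS
  rw [pv_win_full sub m k, PySem.List.slice_to_natCast]
  have h1 : ((m : Int) + 1) = (((m + 1 : ℕ) : ℕ) : Int) := by push_cast; ring
  rw [h1, PySem.List.slice_from_natCast]
  have e1 : ((k + m : ℕ) : Int) - (m : Int) = ((k : ℕ) : Int) := by push_cast; ring
  have e2 : ((k + m : ℕ) : Int) = ((k : ℕ) : Int) + ((m : ℕ) : Int) := by push_cast; ring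
  rw [e1, e2, PySem.List.slice_natCast_add]
  have e3 : ((k : ℕ) : Int) + ((m : ℕ) : Int) + 1 = (((k + m + 1 : ℕ) : ℕ) : Int) := by push_cast; ring
  have e4 : ((k : ℕ) : Int) + ((m : ℕ) : Int) + ((m : ℕ) : Int) + 1
      = (((k + m + 1 : ℕ) : ℕ) : Int) + ((m : ℕ) : Int) := by push_cast; ring
  rw [e3, e4, PySem.List.slice_natCast_add]
  congr 1
  · rw [List.take_take]
    congr 1
    omega
  · rw [List.drop_take]
    have h2 : 2 * m + 1 - (m + 1) = m := by omega
    rw [h2, List.drop_drop]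
    have h3 : k + (m + 1) = k + m + 1 := by omega
    rw [h3]

-- in a full window, B's center is A's current token
theorem pv_cen_eq (sub : List Int) (m k : ℕ) (h : k + (2 * m + 1) ≤ sub.length) :
    pvCen sub (m : Int) k = sub.getD (k + m) 0 := by
  unfold pvCen
  rw [pv_win_full sub m k, PySem.List.pyGet?_natCast]
  have hm : m < (List.take (2 * m + 1) (List.drop k sub)).length := by
    rw [List.length_take, List.length_drop]; omega
  have hkm : k + m < sub.length := by omega
  rw [List.getElem?_eq_getElem hm, List.getD_eq_getElem sub 0 hkm]
  simp only [Option.getD_some, List.getElem_take, List.getElem_drop]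

-- replicate is the constant map over the same list
theorem pv_replicate_map (s : List Int) (c : Int) :
    List.replicate s.length c = s.map fun _ => c := by
  induction s with
  | nil => rfl
  | cons x xs ih => simp only [List.length_cons, List.replicate_succ, List.map_cons, ih]

-- re-indexing A's guarded centers (offset m) to B's guarded window positions (offset 0)
theorem pv_reindex {α : Type} (n m : ℕ) (F G : ℕ → List α)
    (c : ℕ → Prop) [DecidablePred c]
    (hc : ∀ k, c k ↔ ¬ (k + (2 * m + 1) ≤ n))
    (hFG : ∀ k, k + (2 * m + 1) ≤ n → F (k + m) = G k) :
    ((List.range n).flatMap fun (i : ℕ) =>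
       if (i : Int) < (m : Int) ∨ (i : Int) ≥ (n : Int) - (m : Int) then [] else F i)
    = (List.range n).flatMap fun (k : ℕ) => if c k then [] else G k := by
  have hL : (fun (i : ℕ) =>
      if (i : Int) < (m : Int) ∨ (i : Int) ≥ (n : Int) - (m : Int) then [] else F i)
      = fun i => if m ≤ i ∧ i < n - m then F i else [] := by
    funext i
    by_cases h : m ≤ i ∧ i < n - m
    · rw [if_neg (by omega), if_pos h]
    · rw [if_pos (by omega), if_neg h]
  have hR : (fun (k : ℕ) => if c k then [] else G k)
      = fun k => if k < n - 2 * m then G k else [] := by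
    funext k
    by_cases h : k < n - 2 * m
    · rw [if_neg (by rw [hc k]; omega), if_pos h]
    · rw [if_pos (by rw [hc k]; omega), if_neg h]
  rw [hL, hR, pv_band m (n - m) F n, pv_cut (n - 2 * m) G n]
  have h1 : min (n - m) n - m = n - 2 * m := by omega
  have h2 : min (n - 2 * m) n = n - 2 * m := by omega
  rw [h1, h2]
  refine List.flatMap_congr ?_
  intro k hk
  rw [List.mem_range] at hk
  exact hFG k (by omega)

-- per-sentence agreement outside the wraparound region
theorem pv_row_eq (sub : List Int) (ws : Int)
    (hout : ¬ (ws ≤ -2 ∧ -ws < (sub.length : Int))) :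
    ((List.range sub.length).flatMap fun (i : ℕ) =>
        if (i : Int) < ws ∨ (i : Int) ≥ (sub.length : Int) - ws then [] else pvS sub ws i)
      = ((List.range sub.length).flatMap fun (k : ℕ) =>
        if ((pvWin sub ws k).length : Int) ≠ 2 * ws + 1 then [] else pvCtx sub ws k)
    ∧ ((List.range sub.length).flatMap fun (i : ℕ) =>
        if (i : Int) < ws ∨ (i : Int) ≥ (sub.length : Int) - ws then []
        else (pvS sub ws i).map fun _ => sub.getD i 0)
      = ((List.range sub.length).flatMap fun (k : ℕ) =>
        if ((pvWin sub ws k).length : Int) ≠ 2 * ws + 1 then []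
        else List.replicate (pvCtx sub ws k).length (pvCen sub ws k)) := by
  rcases lt_or_ge ws 0 with hneg | hpos
  · -- ws < 0: both rows are empty
    have hA : ∀ i : ℕ, pvS sub ws i = [] := by
      intro i
      apply pv_S_nil sub ws i hneg
      by_cases h2 : ws ≤ -2
      · have h3 : ¬ (-ws < (sub.length : Int)) := fun hlt => hout ⟨h2, hlt⟩
        right; omega
      · left; omega
    constructor <;>
    · trans ([] : List Int)
      · refine List.flatMap_eq_nil_iff.2 fun i _ => ?_
        split_ifs with h
        · rfl
        · simp [hA i]
      · refine (List.flatMap_eq_nil_iff.2 fun k _ => ?_).symm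
        rw [if_pos (pv_win_guard_neg sub ws k hneg)]
  · -- ws = m ≥ 0: re-index A's centers to B's window positions
    obtain ⟨m, rfl⟩ : ∃ m : ℕ, ws = (m : Int) := ⟨ws.toNat, (Int.toNat_of_nonneg hpos).symm⟩
    constructor
    · exact pv_reindex sub.length m (pvS sub (m : Int)) (pvCtx sub (m : Int))
        (fun k => ((pvWin sub (m : Int) k).length : Int) ≠ 2 * (m : Int) + 1)
        (fun k => pv_guard_iff sub m k)
        (fun k hk => (pv_ctx_eq sub m k hk).symm)
    · refine pv_reindex sub.length m
        (fun i => (pvS sub (m : Int) i).map fun _ => sub.getD i 0)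
        (fun k => List.replicate (pvCtx sub (m : Int) k).length (pvCen sub (m : Int) k))
        (fun k => ((pvWin sub (m : Int) k).length : Int) ≠ 2 * (m : Int) + 1)
        (fun k => pv_guard_iff sub m k) ?_
      intro k hk
      show List.map (fun _ => sub.getD (k + m) 0) (pvS sub (m : Int) (k + m))
          = List.replicate (pvCtx sub (m : Int) k).length (pvCen sub (m : Int) k)
      rw [pv_ctx_eq sub m k hk, pv_cen_eq sub m k hk, pv_replicate_map]

-- inside D_: B's rows are all empty …
theorem pv_B_empty (l : List (List Int)) (ws : Int) (hws : ws < 0) :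
    skipgram_preprocessing_alt l ws = ([], []) := by
  rw [pv_B_eq]
  refine Prod.ext_iff.2 ⟨?_, ?_⟩ <;>
  · refine List.flatMap_eq_nil_iff.2 fun sub _ => ?_
    refine List.flatMap_eq_nil_iff.2 fun k _ => ?_
    rw [if_pos (pv_win_guard_neg sub ws k hws)]

-- … while A's first row picks up a wrapped, nonempty slice at center 0
theorem pv_A_fst_ne_nil (l : List (List Int)) (ws : Int) (hws : ws ≤ -2)
    (sub : List Int) (hsub : sub ∈ l) (hlen : -ws < (sub.length : Int)) :
    (skipgram_preprocessing l ws).1 ≠ [] := by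
  rw [pv_A_eq]
  intro hnil
  have hrow := List.flatMap_eq_nil_iff.1 hnil sub hsub
  have h0 : (0 : ℕ) ∈ List.range sub.length := by
    rw [List.mem_range]; omega
  have hterm := List.flatMap_eq_nil_iff.1 hrow 0 h0
  rw [if_neg (by push_cast; omega)] at hterm
  unfold pvS at hterm
  have hlen2 := congrArg List.length hterm
  rw [List.length_append, PySem.List.length_slice, PySem.List.length_slice] at hlen2
  have c2 : PySem.List.clampIdx sub.length (((0 : ℕ) : Int) + ws + 1)
      = ((sub.length : Int) + ws + 1).toNat := by
    simp only [PySem.List.clampIdx]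
    split_ifs <;> omega
  have c3 : PySem.List.clampIdx sub.length (((0 : ℕ) : Int) + 1) = 1 := by
    simp only [PySem.List.clampIdx]
    split_ifs <;> omega
  have c0 : PySem.List.clampIdx sub.length (((0 : ℕ) : Int)) = 0 := by
    simp only [PySem.List.clampIdx]
    split_ifs <;> omega
  rw [c0, c2, c3] at hlen2
  simp only [List.length_nil] at hlen2
  have hge : (2 : ℕ) ≤ ((sub.length : Int) + ws + 1).toNat := by omega
  omega

-- ===== VERDICT (by name: the statements are the Claim_ definitions above) =====
theorem skipgram_preprocessing_spec : Claim_unchanged_skipgram_preprocessing := by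
  intro l ws _
  unfold Spec_skipgram_preprocessing D_skipgram_preprocessing
  intro hnd
  rw [pv_A_eq, pv_B_eq]
  have hout : ∀ sub ∈ l, ¬ (ws ≤ -2 ∧ -ws < (sub.length : Int)) := by
    intro sub hsub ⟨h1, h2⟩
    exact hnd ⟨h1, sub, hsub, h2⟩
  refine Prod.ext_iff.2 ⟨?_, ?_⟩
  · exact List.flatMap_congr fun sub hsub => (pv_row_eq sub ws (hout sub hsub)).1
  · exact List.flatMap_congr fun sub hsub => (pv_row_eq sub ws (hout sub hsub)).2

theorem skipgram_preprocessing_changed : Claim_changed_skipgram_preprocessing := by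
  unfold Claim_changed_skipgram_preprocessing; decide

theorem skipgram_preprocessing_tight : Claim_exact_skipgram_preprocessing := by
  intro l ws _ hd
  obtain ⟨hws, sub, hsub, hlen⟩ := hd
  intro heq
  have hB := pv_B_empty l ws (by omega)
  have := pv_A_fst_ne_nil l ws hws sub hsub hlen
  rw [heq, hB] at this
  exact this rfl
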